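-- pv_equiv track=rewrite | github.com/ayoubzulfiqar/Leeteration | ProjectEmployeesII/project_employees_ii.py | project_employees_ii
-- ===== SOURCE A (Python) =====
-- def project_employees_ii(employees, projects, assignments):
--     """
--     Finds employees who are assigned to all existing projects.
--
--     Args:
--         employees: A list of tuples, where each tuple is (employee_id, employee_name).
--         projects: A list of tuples, where each tuple is (project_id, project_name).
--         assignments: A list of tuples, where each tuple is (employee_id, project_id).
--
--     Returns:
--         A list of tuples, where each tuple is (employee_id, employee_name)
--         for employees assigned to all projects. The results are sorted by employee_id.
--     """
--
--     all_project_ids = set(p_id for p_id, _ in projects)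
--
--     if not all_project_ids:
--         return []
--
--     employee_assigned_projects = {}
--     for emp_id, proj_id in assignments:
--         if emp_id not in employee_assigned_projects:
--             employee_assigned_projects[emp_id] = set()
--         employee_assigned_projects[emp_id].add(proj_id)
--
--     result_employee_ids = []
--     for emp_id, assigned_project_set in employee_assigned_projects.items():
--         if assigned_project_set == all_project_ids:
--             result_employee_ids.append(emp_id)
--
--     employee_name_map = {emp_id: emp_name for emp_id, emp_name in employees}
--
--     final_result = []
--     result_employee_ids.sort()
--     for emp_id in result_employee_ids:
--         if emp_id in employee_name_map:
--             final_result.append((emp_id, employee_name_map[emp_id]))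
--
--     return final_result
-- ===== SOURCE B (Python) =====
-- def project_employees_ii(employees, projects, assignments):
--     """Candidate-driven: iterate the employee name map in sorted id order and,
--     for each candidate, compare its sorted distinct assigned-project list with
--     the sorted distinct project-id list."""
--     target = sorted({p for p, _ in projects})
--     if not target:
--         return []
--     names = dict(employees)
--     out = []
--     for emp in sorted(names):
--         if sorted({p for e, p in assignments if e == emp}) == target:
--             out.append((emp, names[emp]))
--     return out
-- ===== Notes on version B (the rewrite author's own statement) =====
-- stated objective: simpler
-- what changed: A builds a hash index of per-employee assigned-project sets in one pass over assignments and then selects by set equality; B is candidate-driven with no index at all: it iterates the employee name map in sorted id order and, per candidate, rescans assignments and compares sorted distinct project lists, emitting the output directly in order.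
import Mathlib
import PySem

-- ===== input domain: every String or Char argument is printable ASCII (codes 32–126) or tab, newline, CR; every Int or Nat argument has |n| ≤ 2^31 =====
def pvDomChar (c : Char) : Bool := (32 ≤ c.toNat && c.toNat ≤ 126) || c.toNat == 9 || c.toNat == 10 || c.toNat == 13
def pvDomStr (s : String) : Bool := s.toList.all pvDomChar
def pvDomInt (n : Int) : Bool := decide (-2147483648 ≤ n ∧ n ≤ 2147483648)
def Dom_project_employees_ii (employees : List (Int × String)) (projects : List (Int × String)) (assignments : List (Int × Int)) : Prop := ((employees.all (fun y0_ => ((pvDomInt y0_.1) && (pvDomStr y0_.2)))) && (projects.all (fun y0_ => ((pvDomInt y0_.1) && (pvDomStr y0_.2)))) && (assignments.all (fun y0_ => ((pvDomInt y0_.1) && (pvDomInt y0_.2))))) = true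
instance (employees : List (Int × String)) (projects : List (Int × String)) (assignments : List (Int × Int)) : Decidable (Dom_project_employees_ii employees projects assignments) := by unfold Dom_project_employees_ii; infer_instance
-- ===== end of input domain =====

-- B drops A's hash index of per-employee project sets: it is candidate-driven, scanning
-- assignments per employee (iterated in sorted id order) and comparing sorted distinct
-- project lists (simpler decomposition, not faster).


-- ===== PORT A =====
-- literal transliteration of Source A: full per-employee assigned-project sets, set equality
-- against the project-id set, sort the ids, then look the names up.
def project_employees_ii (employees : List (Int × String)) (projects : List (Int × String)) (assignments : List (Int × Int)) : List (Int × String) :=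
  let all_project_ids : PySem.Set Int := PySem.Set.ofList (projects.map (·.1))
  if all_project_ids = [] then []
  else
    -- for emp, proj in assignments: if emp not in d: d[emp] = set();  d[emp].add(proj)
    let eap : PySem.Dict Int (PySem.Set Int) :=
      assignments.foldl
        (fun d ep =>
          (if d.contains ep.1 then d else d.insert ep.1 PySem.Set.empty).modify
            ep.1 PySem.Set.empty (fun s => PySem.Set.add s ep.2))
        PySem.Dict.empty
    let result_employee_ids : List Int :=
      eap.items.foldl
        (fun acc kv => if PySem.Set.equal kv.2 all_project_ids then acc ++ [kv.1] else acc) []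
    let name_map : PySem.Dict Int String :=
      employees.foldl (fun d e => d.insert e.1 e.2) PySem.Dict.empty
    let sorted_ids := PySem.List.sorted result_employee_ids (fun x => x) false
    sorted_ids.foldl
      (fun acc e => if name_map.contains e then acc ++ [(e, name_map.getD e "")] else acc) []

-- ===== PORT B =====
-- literal transliteration of Source B: no index; iterate sorted name-map keys and per candidate
-- rescan assignments, comparing sorted distinct project lists against the sorted target.
def project_employees_ii_alt (employees : List (Int × String)) (projects : List (Int × String)) (assignments : List (Int × Int)) : List (Int × String) :=
  let target : List Int := PySem.List.sorted (PySem.Set.ofList (projects.map (·.1))) (fun x => x) false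
  if target = [] then []
  else
    let names : PySem.Dict Int String := PySem.Dict.ofList employees
    (PySem.List.sorted names.keys (fun x => x) false).foldl
      (fun out emp =>
        if PySem.List.sorted (PySem.Set.ofList ((assignments.filter (fun a => a.1 == emp)).map (·.2))) (fun x => x) false = target
        then out ++ [(emp, names.getD emp "")] else out) []

-- ===== PRECONDITION & SPEC =====
def Spec_project_employees_ii (employees : List (Int × String)) (projects : List (Int × String)) (assignments : List (Int × Int)) (out : List (Int × String)) : Prop := out = project_employees_ii_alt employees projects assignments
instance (employees : List (Int × String)) (projects : List (Int × String)) (assignments : List (Int × Int)) (out : List (Int × String)) : Decidable (Spec_project_employees_ii employees projects assignments out) := by unfold Spec_project_employees_ii; infer_instance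

-- ===== CLAIM (what is proved, stated in full; the proofs are below) =====
def Claim_equal_project_employees_ii : Prop := ∀ (employees : List (Int × String)) (projects : List (Int × String)) (assignments : List (Int × Int)), Dom_project_employees_ii employees projects assignments → Spec_project_employees_ii employees projects assignments (project_employees_ii employees projects assignments)

-- ===== LEMMAS AND PROOFS =====
-- step lemma for A's dict-building loop body
lemma pvStepA_getD (d : PySem.Dict Int (PySem.Set Int)) (ep : Int × Int) (e : Int) :
    ((if d.contains ep.1 then d else d.insert ep.1 PySem.Set.empty).modify
        ep.1 PySem.Set.empty (fun s => PySem.Set.add s ep.2)).getD e PySem.Set.empty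
    = if e = ep.1 then PySem.Set.add (d.getD ep.1 PySem.Set.empty) ep.2
      else d.getD e PySem.Set.empty := by
  by_cases hc : d.contains ep.1
  · simp [hc, PySem.Dict.getD_modify]
  · rw [if_neg hc, PySem.Dict.getD_modify,
      PySem.Dict.getD_of_not_contains d PySem.Set.empty (by simpa using hc)]
    by_cases he : e = ep.1 <;> simp [he, PySem.Dict.getD_insert]

lemma pvStepA_keys (d : PySem.Dict Int (PySem.Set Int)) (ep : Int × Int) :
    ((if d.contains ep.1 then d else d.insert ep.1 PySem.Set.empty).modify
        ep.1 PySem.Set.empty (fun s => PySem.Set.add s ep.2)).keys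
    = PySem.Set.add d.keys ep.1 := by
  by_cases hc : d.contains ep.1
  · rw [if_pos hc, PySem.Dict.keys_modify, PySem.Dict.keys_insert_of_contains _ _ hc]
    exact (PySem.Set.add_of_mem ((PySem.Dict.contains_iff_mem_keys d ep.1).mp hc)).symm
  · rw [if_neg hc, PySem.Dict.keys_modify,
      PySem.Dict.keys_insert_of_contains _ _ (PySem.Dict.contains_insert_self _ _ _),
      PySem.Dict.keys_insert_of_not_contains _ _ (by simpa using hc)]
    exact (PySem.Set.add_of_not_mem (fun h => hc ((PySem.Dict.contains_iff_mem_keys d ep.1).mpr h))).symm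

lemma pvFoldA_getD (as : List (Int × Int)) (d : PySem.Dict Int (PySem.Set Int)) (e : Int) :
    (as.foldl
        (fun d ep =>
          (if d.contains ep.1 then d else d.insert ep.1 PySem.Set.empty).modify
            ep.1 PySem.Set.empty (fun s => PySem.Set.add s ep.2)) d).getD e PySem.Set.empty
    = PySem.Set.update (d.getD e PySem.Set.empty)
        ((as.filter (fun a => a.1 == e)).map (·.2)) := by
  induction as generalizing d with
  | nil => simp [PySem.Set.update]
  | cons a as ih =>
    rw [List.foldl_cons, ih]
    by_cases he : a.1 = e
    · rw [List.filter_cons_of_pos (by simp [he]), List.map_cons, PySem.Set.update_cons,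
        pvStepA_getD, if_pos he.symm, he]
    · rw [List.filter_cons_of_neg (by simp [he]), pvStepA_getD, if_neg (fun h => he h.symm)]

lemma pvFoldA_keys (as : List (Int × Int)) (d : PySem.Dict Int (PySem.Set Int)) :
    (as.foldl
        (fun d ep =>
          (if d.contains ep.1 then d else d.insert ep.1 PySem.Set.empty).modify
            ep.1 PySem.Set.empty (fun s => PySem.Set.add s ep.2)) d).keys
    = PySem.Set.update d.keys (as.map (·.1)) := by
  induction as generalizing d with
  | nil => simp [PySem.Set.update]
  | cons a as ih =>
    rw [List.foldl_cons, ih, List.map_cons, PySem.Set.update_cons, pvStepA_keys]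

-- A's selection condition and B's sorted-list comparison agree, for nonempty nodup valid
lemma pvCond_iff (valid : PySem.Set Int) (hvnd : valid.Nodup) (hv : valid ≠ [])
    (as : List (Int × Int)) (e : Int) :
    (e ∈ PySem.Set.ofList (as.map (·.1)) ∧
      PySem.Set.equal (PySem.Set.ofList ((as.filter (fun a => a.1 == e)).map (·.2))) valid = true)
    ↔ PySem.List.sorted (PySem.Set.ofList ((as.filter (fun a => a.1 == e)).map (·.2))) (fun x => x) false
        = PySem.List.sorted valid (fun x => x) false := by
  rw [PySem.List.sorted_id_eq_sorted_id_iff_perm]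
  constructor
  · rintro ⟨-, heq⟩
    rw [PySem.Set.equal_iff] at heq
    exact (List.perm_ext_iff_of_nodup (PySem.Set.nodup_ofList _) hvnd).mpr heq
  · intro hperm
    refine ⟨?_, (PySem.Set.equal_iff _ _).mpr (fun x => hperm.mem_iff)⟩
    obtain ⟨v, hvmem⟩ := List.exists_mem_of_ne_nil valid hv
    have : v ∈ PySem.Set.ofList ((as.filter (fun a => a.1 == e)).map (·.2)) :=
      hperm.mem_iff.mpr hvmem
    rw [PySem.Set.mem_ofList] at this
    obtain ⟨a, haf, -⟩ := List.mem_map.mp this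
    obtain ⟨ha, hae⟩ := List.mem_filter.mp haf
    rw [PySem.Set.mem_ofList]
    exact List.mem_map.mpr ⟨a, ha, by simpa using hae⟩

-- the non-empty-projects case, over an arbitrary nonempty nodup project-id set
lemma pvMain (employees : List (Int × String)) (valid : PySem.Set Int) (as : List (Int × Int))
    (hvnd : valid.Nodup) (hv : valid ≠ []) :
    (PySem.List.sorted
        ((as.foldl
            (fun d ep =>
              (if d.contains ep.1 then d else d.insert ep.1 PySem.Set.empty).modify
                ep.1 PySem.Set.empty (fun s => PySem.Set.add s ep.2)) PySem.Dict.empty).items.foldl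
          (fun acc kv => if PySem.Set.equal kv.2 valid then acc ++ [kv.1] else acc) [])
        (fun x => x) false).foldl
      (fun acc e =>
        if (employees.foldl (fun d e => d.insert e.1 e.2) PySem.Dict.empty).contains e then
          acc ++ [(e, (employees.foldl (fun d e => d.insert e.1 e.2) PySem.Dict.empty).getD e "")]
        else acc) []
    = (PySem.List.sorted (PySem.Dict.ofList employees).keys (fun x => x) false).foldl
        (fun out emp =>
          if PySem.List.sorted (PySem.Set.ofList ((as.filter (fun a => a.1 == emp)).map (·.2))) (fun x => x) false
              = PySem.List.sorted valid (fun x => x) false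
          then out ++ [(emp, (PySem.Dict.ofList employees).getD emp "")] else out) [] := by
  set NM := employees.foldl (fun d e => d.insert e.1 e.2) PySem.Dict.empty with hNM
  set EAP := as.foldl
      (fun d ep =>
        (if d.contains ep.1 then d else d.insert ep.1 PySem.Set.empty).modify
          ep.1 PySem.Set.empty (fun s => PySem.Set.add s ep.2)) PySem.Dict.empty with hEAP
  have hnames : PySem.Dict.ofList employees = NM := rfl
  have hAget : ∀ e, EAP.getD e PySem.Set.empty
      = PySem.Set.ofList ((as.filter (fun a => a.1 == e)).map (·.2)) := by
    intro e; rw [hEAP, pvFoldA_getD, PySem.Dict.getD_empty]; rfl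
  have hAkeys : EAP.keys = PySem.Set.ofList (as.map (·.1)) := by
    rw [hEAP, pvFoldA_keys]; rfl
  have hndA : EAP.keys.Nodup := by rw [hAkeys]; exact PySem.Set.nodup_ofList _
  have hndNM : NM.keys.Nodup := by rw [← hnames]; exact PySem.Dict.nodup_keys_ofList _
  -- rewrite B's fold (a Prop-valued if) through foldl_append_if
  have hB := PySem.List.foldl_append_if
      (fun emp => decide (PySem.List.sorted (PySem.Set.ofList ((as.filter (fun a => a.1 == emp)).map (·.2))) (fun x => x) false
        = PySem.List.sorted valid (fun x => x) false))
      (fun emp => (emp, NM.getD emp ""))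
      (PySem.List.sorted NM.keys (fun x => x) false) []
  simp only [decide_eq_true_eq] at hB
  rw [hnames, hB,
      PySem.Dict.items_eq_map_keys EAP hndA PySem.Set.empty,
      PySem.List.foldl_append_if, PySem.List.foldl_append_if]
  simp only [List.nil_append, List.filter_map, List.map_map, Function.comp_def, hAget,
    List.map_id', hAkeys]
  -- both sides: map (fun e => (e, NM.getD e "")) of a pairwise-≤, nodup id list; show those equal
  apply congrArg
  set condA := fun x : Int =>
    PySem.Set.equal (PySem.Set.ofList ((as.filter (fun a => a.1 == x)).map (·.2))) valid with hcondA
  set condB := fun emp : Int =>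
    PySem.List.sorted (PySem.Set.ofList ((as.filter (fun a => a.1 == emp)).map (·.2))) (fun x => x) false
      = PySem.List.sorted valid (fun x => x) false with hcondB
  have hleL : (List.filter NM.contains
      (PySem.List.sorted ((PySem.Set.ofList (as.map (·.1))).filter condA) (fun x => x) false)).Pairwise (· ≤ ·) :=
    (PySem.List.sorted_pairwise _ (fun x => x)).filter _
  have hleR : (List.filter (fun emp => decide (condB emp))
      (PySem.List.sorted NM.keys (fun x => x) false)).Pairwise (· ≤ ·) :=
    (PySem.List.sorted_pairwise _ (fun x => x)).filter _
  have hndL : (List.filter NM.contains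
      (PySem.List.sorted ((PySem.Set.ofList (as.map (·.1))).filter condA) (fun x => x) false)).Nodup :=
    (((PySem.List.sorted_perm _ _ _).nodup_iff).mpr ((PySem.Set.nodup_ofList _).filter _)).filter _
  have hndR : (List.filter (fun emp => decide (condB emp))
      (PySem.List.sorted NM.keys (fun x => x) false)).Nodup :=
    (((PySem.List.sorted_perm _ _ _).nodup_iff).mpr hndNM).filter _
  refine PySem.List.eq_of_perm_of_pairwise_le_of_injective (fun x => x) (fun a b h => h)
    ((List.perm_ext_iff_of_nodup hndL hndR).mpr ?_) hleL hleR
  intro e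
  simp only [List.mem_filter, PySem.List.mem_sorted, PySem.Set.mem_ofList, List.mem_filter,
    decide_eq_true_eq]
  constructor
  · rintro ⟨⟨hmem, hq⟩, hc⟩
    refine ⟨(PySem.Dict.contains_iff_mem_keys NM e).mp hc, ?_⟩
    exact (pvCond_iff valid hvnd hv as e).mp ⟨(PySem.Set.mem_ofList _ _).mpr hmem, hq⟩
  · rintro ⟨hk, hcond⟩
    obtain ⟨hmem, hq⟩ := (pvCond_iff valid hvnd hv as e).mpr hcond
    exact ⟨⟨(PySem.Set.mem_ofList _ _).mp hmem, hq⟩, (PySem.Dict.contains_iff_mem_keys NM e).mpr hk⟩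

theorem project_employees_ii_spec : Claim_equal_project_employees_ii := by
  intro employees projects assignments _
  show project_employees_ii employees projects assignments
      = project_employees_ii_alt employees projects assignments
  simp only [project_employees_ii, project_employees_ii_alt]
  by_cases hv : PySem.Set.ofList (projects.map (·.1)) = []
  · rw [if_pos hv, if_pos (by rw [PySem.List.sorted_eq_nil_iff]; exact hv)]
  · rw [if_neg hv, if_neg (by rw [PySem.List.sorted_eq_nil_iff]; exact hv)]
    exact pvMain employees (PySem.Set.ofList (projects.map (·.1))) assignments
      (PySem.Set.nodup_ofList _) hv
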